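-- pv_equiv track=rewrite | github.com/mangeshraut712/ai-rubiks-cube | frontend/public/legacy-2x2-solver/Part 2/Solutions.py | ids_solve
-- ===== SOURCE A (Python) =====
-- from typing import List, Optional, Tuple, Dict
--
-- MOVES = {
--     "U":  (2,0,3,1, 20,21,6,7, 4,5,10,11, 12,13,14,15, 8,9,18,19, 16,17,22,23),
--     "U'": (1,3,0,2, 8,9,6,7, 16,17,10,11, 12,13,14,15, 20,21,18,19, 4,5,22,23),
--     "R":  (0,9,2,11, 6,4,7,5, 8,13,10,15, 12,22,14,20, 16,17,18,19, 3,21,1,23),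
--     "R'": (0,22,2,20, 5,7,4,6, 8,1,10,3, 12,9,14,11, 16,17,18,19, 15,21,13,23),
--     "F":  (0,1,19,17, 2,5,3,7, 10,8,11,9, 6,4,14,15, 16,12,18,13, 20,21,22,23),
--     "F'": (0,1,4,6, 13,5,12,7, 9,11,8,10, 17,19,14,15, 16,3,18,2, 20,21,22,23),
--     "D":  (0,1,2,3, 4,5,10,11, 8,9,18,19, 14,12,15,13, 16,17,22,23, 20,21,6,7),
--     "D'": (0,1,2,3, 4,5,22,23, 8,9,6,7, 13,15,12,14, 16,17,10,11, 20,21,18,19),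
--     "L":  (23,1,21,3, 4,5,6,7, 0,9,2,11, 8,13,10,15, 18,16,19,17, 20,14,22,12),
--     "L'": (8,1,10,3, 4,5,6,7, 12,9,14,11, 23,13,21,15, 17,19,16,18, 20,2,22,0),
--     "B":  (5,7,2,3, 4,15,6,14, 8,9,10,11, 12,13,16,18, 1,17,0,19, 22,20,23,21),
--     "B'": (18,16,2,3, 4,0,6,1, 8,9,10,11, 12,13,7,5, 14,17,15,19, 21,23,20,22),
-- }
--
-- INVERSE = {"U": "U'", "U'": "U", "R": "R'", "R'": "R", "F": "F'", "F'": "F",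
--            "D": "D'", "D'": "D", "L": "L'", "L'": "L", "B": "B'", "B'": "B"}
--
-- ALL_MOVES = tuple(MOVES.keys())
--
-- SOLVED = "WWWWRRRRGGGGYYYYOOOOBBBB"
--
-- def apply_move(state: str, move: str) -> str:
--     """Apply move - optimized with tuple lookup."""
--     perm = MOVES[move]
--     return ''.join(state[i] for i in perm)
--
-- def ids_solve(initial: str, max_depth: int = 14) -> Tuple[Optional[List[str]], int]:
--     """Iterative Deepening Search."""
--     if initial == SOLVED:
--         return [], 0
--
--     total_nodes = 0
--
--     for depth in range(1, max_depth + 1):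
--         result, nodes = _dls(initial, depth)
--         total_nodes += nodes
--         if result is not None:
--             return result, total_nodes
--
--     return None, total_nodes
--
-- def _dls(initial: str, max_depth: int) -> Tuple[Optional[List[str]], int]:
--     """Depth-limited search."""
--     stack = [(initial, [], "")]
--     nodes = 0
--
--     while stack:
--         state, path, last_move = stack.pop()
--         nodes += 1
--
--         if state == SOLVED:
--             return path, nodes
--
--         if len(path) >= max_depth:
--             continue
--
--         for move in ALL_MOVES:
--             if last_move and (INVERSE[move] == last_move or move[0] == last_move[0]):
--                 continue
--             new_state = apply_move(state, move)
--             stack.append((new_state, path + [move], move))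
--
--     return None, nodes
-- ===== SOURCE B (Python) =====
-- from typing import List, Optional, Tuple
--
-- MOVES = {
--     "U":  (2,0,3,1, 20,21,6,7, 4,5,10,11, 12,13,14,15, 8,9,18,19, 16,17,22,23),
--     "U'": (1,3,0,2, 8,9,6,7, 16,17,10,11, 12,13,14,15, 20,21,18,19, 4,5,22,23),
--     "R":  (0,9,2,11, 6,4,7,5, 8,13,10,15, 12,22,14,20, 16,17,18,19, 3,21,1,23),
--     "R'": (0,22,2,20, 5,7,4,6, 8,1,10,3, 12,9,14,11, 16,17,18,19, 15,21,13,23),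
--     "F":  (0,1,19,17, 2,5,3,7, 10,8,11,9, 6,4,14,15, 16,12,18,13, 20,21,22,23),
--     "F'": (0,1,4,6, 13,5,12,7, 9,11,8,10, 17,19,14,15, 16,3,18,2, 20,21,22,23),
--     "D":  (0,1,2,3, 4,5,10,11, 8,9,18,19, 14,12,15,13, 16,17,22,23, 20,21,6,7),
--     "D'": (0,1,2,3, 4,5,22,23, 8,9,6,7, 13,15,12,14, 16,17,10,11, 20,21,18,19),
--     "L":  (23,1,21,3, 4,5,6,7, 0,9,2,11, 8,13,10,15, 18,16,19,17, 20,14,22,12),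
--     "L'": (8,1,10,3, 4,5,6,7, 12,9,14,11, 23,13,21,15, 17,19,16,18, 20,2,22,0),
--     "B":  (5,7,2,3, 4,15,6,14, 8,9,10,11, 12,13,16,18, 1,17,0,19, 22,20,23,21),
--     "B'": (18,16,2,3, 4,0,6,1, 8,9,10,11, 12,13,7,5, 14,17,15,19, 21,23,20,22),
-- }
--
-- INVERSE = {"U": "U'", "U'": "U", "R": "R'", "R'": "R", "F": "F'", "F'": "F",
--            "D": "D'", "D'": "D", "L": "L'", "L'": "L", "B": "B'", "B'": "B"}
--
-- ALL_MOVES = tuple(MOVES.keys())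
--
-- SOLVED = "WWWWRRRRGGGGYYYYOOOOBBBB"
--
-- def apply_move(state: str, move: str) -> str:
--     perm = MOVES[move]
--     return ''.join(state[i] for i in perm)
--
-- def _dfs(state: str, path: List[str], last_move: str, max_depth: int) -> Tuple[Optional[List[str]], int]:
--     """Recursive depth-limited DFS; returns (solution path or None, nodes visited)."""
--     nodes = 1
--     if state == SOLVED:
--         return path, nodes
--     if len(path) >= max_depth:
--         return None, nodes
--     # reversed so moves are tried in the order the LIFO stack of the original popped them
--     for move in reversed(ALL_MOVES):
--         if last_move and (INVERSE[move] == last_move or move[0] == last_move[0]):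
--             continue
--         result, n = _dfs(apply_move(state, move), path + [move], move, max_depth)
--         nodes += n
--         if result is not None:
--             return result, nodes
--     return None, nodes
--
-- def ids_solve(initial: str, max_depth: int = 14) -> Tuple[Optional[List[str]], int]:
--     """Iterative Deepening Search (recursive DFS per depth)."""
--     if initial == SOLVED:
--         return [], 0
--     total_nodes = 0
--     for depth in range(1, max_depth + 1):
--         result, nodes = _dfs(initial, [], "", depth)
--         total_nodes += nodes
--         if result is not None:
--             return result, total_nodes
--     return None, total_nodes
-- ===== Notes on version B (the rewrite author's own statement) =====
-- stated objective: alternative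
-- what changed: replaces the explicit LIFO stack of the depth-limited search with a recursive DFS helper that threads the node counter through return values (moves visited in reversed order, matching the stack's pop order), keeping the outer deepening loop
import Mathlib
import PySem

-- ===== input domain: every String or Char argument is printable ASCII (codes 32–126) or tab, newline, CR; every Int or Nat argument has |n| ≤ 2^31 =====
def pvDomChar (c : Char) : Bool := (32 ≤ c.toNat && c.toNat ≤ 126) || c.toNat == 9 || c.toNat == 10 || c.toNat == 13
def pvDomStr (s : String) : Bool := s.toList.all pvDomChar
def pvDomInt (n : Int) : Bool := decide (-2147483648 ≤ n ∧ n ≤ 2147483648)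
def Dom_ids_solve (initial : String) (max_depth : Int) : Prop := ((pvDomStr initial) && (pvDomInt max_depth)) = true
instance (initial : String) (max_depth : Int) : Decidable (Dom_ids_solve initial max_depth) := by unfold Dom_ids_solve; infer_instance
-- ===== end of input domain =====

-- B replaces the explicit-stack depth-limited loop with a recursive DFS helper threading the node counter; same cost (alternative decomposition).


-- ===== shared module constants (MOVES, INVERSE, ALL_MOVES, SOLVED, apply_move: identical in Source A and Source B) =====

def pvMoves (m : String) : List Nat :=
  match m with
  | "U"  => [2,0,3,1, 20,21,6,7, 4,5,10,11, 12,13,14,15, 8,9,18,19, 16,17,22,23]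
  | "U'" => [1,3,0,2, 8,9,6,7, 16,17,10,11, 12,13,14,15, 20,21,18,19, 4,5,22,23]
  | "R"  => [0,9,2,11, 6,4,7,5, 8,13,10,15, 12,22,14,20, 16,17,18,19, 3,21,1,23]
  | "R'" => [0,22,2,20, 5,7,4,6, 8,1,10,3, 12,9,14,11, 16,17,18,19, 15,21,13,23]
  | "F"  => [0,1,19,17, 2,5,3,7, 10,8,11,9, 6,4,14,15, 16,12,18,13, 20,21,22,23]
  | "F'" => [0,1,4,6, 13,5,12,7, 9,11,8,10, 17,19,14,15, 16,3,18,2, 20,21,22,23]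
  | "D"  => [0,1,2,3, 4,5,10,11, 8,9,18,19, 14,12,15,13, 16,17,22,23, 20,21,6,7]
  | "D'" => [0,1,2,3, 4,5,22,23, 8,9,6,7, 13,15,12,14, 16,17,10,11, 20,21,18,19]
  | "L"  => [23,1,21,3, 4,5,6,7, 0,9,2,11, 8,13,10,15, 18,16,19,17, 20,14,22,12]
  | "L'" => [8,1,10,3, 4,5,6,7, 12,9,14,11, 23,13,21,15, 17,19,16,18, 20,2,22,0]
  | "B"  => [5,7,2,3, 4,15,6,14, 8,9,10,11, 12,13,16,18, 1,17,0,19, 22,20,23,21]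
  | "B'" => [18,16,2,3, 4,0,6,1, 8,9,10,11, 12,13,7,5, 14,17,15,19, 21,23,20,22]
  | _ => []          -- unreachable: apply_move is only called with moves of ALL_MOVES

def pvInverse (m : String) : String :=
  match m with
  | "U" => "U'" | "U'" => "U" | "R" => "R'" | "R'" => "R" | "F" => "F'" | "F'" => "F"
  | "D" => "D'" | "D'" => "D" | "L" => "L'" | "L'" => "L" | "B" => "B'" | "B'" => "B"
  | _ => ""          -- unreachable

def ALL_MOVES : List String := ["U", "U'", "R", "R'", "F", "F'", "D", "D'", "L", "L'", "B", "B'"]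

def SOLVED : String := "WWWWRRRRGGGGYYYYOOOOBBBB"

-- ''.join(state[i] for i in perm); state[i] raises IndexError when i ≥ len(state) —
-- Pre_ids_solve excludes exactly the inputs that reach such an index, so the default ' ' is never used under Pre_.
def apply_move (state : String) (move : String) : String :=
  String.ofList ((pvMoves move).map (fun i => state.toList.getD i ' '))

-- move[0] (moves and a non-empty last_move are always non-empty strings here)
def pvHead (s : String) : Char := s.toList.headD ' '

-- the redundant-move filter, identical in both sources:
-- last_move and (INVERSE[move] == last_move or move[0] == last_move[0])
def pvSkip (l : String) (m : String) : Bool :=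
  l ≠ "" && (pvInverse m = l || pvHead m = pvHead l)

-- ===== PORT A =====

-- frames a pop of the stack expands to, in ALL_MOVES order (Python appends them in this order)
def dlsChildren (s : String) (p : List String) (l : String) (ms : List String) :
    List (String × List String × String) :=
  ms.filterMap (fun m => if pvSkip l m then none else some (apply_move s m, p ++ [m], m))

-- termination measure: each frame bounds its depth-limited subtree by 13^(remaining depth)
def dlsMeasure (d : Int) (f : String × List String × String) : Nat :=
  13 ^ (d.toNat - f.2.1.length)

-- the lemmas below are cited from the well-founded port definitions (decreasing_by),
-- so their statements and proofs are kept small and explicit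
theorem pvLenAppend (p : List String) (m : String) : (p ++ [m]).length = p.length + 1 := by
  rw [List.length_append, List.length_singleton]

theorem pvSubSplit (a b : Nat) (h : b < a) : a - b = (a - (b + 1)) + 1 :=
  (Nat.sub_sub a b 1 ▸ (Nat.succ_pred_eq_of_pos (Nat.sub_pos_of_lt h)).symm : a - b = (a - b - 1) + 1)

theorem dlsChildren_measure_sum (d : Int) (s : String) (p : List String) (l : String)
    (ms : List String) :
    ((dlsChildren s p l ms).map (dlsMeasure d)).sum
      ≤ ms.length * 13 ^ (d.toNat - (p.length + 1)) := by
  have hall : ∀ x ∈ (dlsChildren s p l ms).map (dlsMeasure d),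
      x ≤ 13 ^ (d.toNat - (p.length + 1)) := by
    intro x hx
    rcases List.mem_map.mp hx with ⟨fr, hfr, rfl⟩
    rcases List.mem_filterMap.mp hfr with ⟨m', _, hsome⟩
    by_cases hsk : pvSkip l m'
    · rw [if_pos hsk] at hsome; cases hsome
    · rw [if_neg hsk] at hsome
      cases Option.some.inj hsome
      refine le_of_eq ?_
      show 13 ^ (d.toNat - (p ++ [m']).length) = _
      rw [pvLenAppend p m']
  have h1 := List.sum_le_card_nsmul _ _ hall
  rw [smul_eq_mul, List.length_map] at h1
  exact le_trans h1 (Nat.mul_le_mul_right _ (List.length_filterMap_le _ ms))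

theorem pvMeasPos (d : Int) (fr : String × List String × String) : 0 < dlsMeasure d fr :=
  pow_pos (by decide) _

theorem pvDlsDec1 (d : Int) (s : String) (p : List String) (l : String)
    (rest : List (String × List String × String)) :
    (rest.map (dlsMeasure d)).sum < (((s, p, l) :: rest).map (dlsMeasure d)).sum := by
  rw [List.map_cons, List.sum_cons]
  exact Nat.lt_add_of_pos_left (pvMeasPos d (s, p, l))

theorem pvDlsDec2 (d : Int) (s : String) (p : List String) (l : String)
    (rest : List (String × List String × String)) (hd : ¬ (p.length : Int) ≥ d) :
    ((((dlsChildren s p l ALL_MOVES).reverse ++ rest)).map (dlsMeasure d)).sum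
      < (((s, p, l) :: rest).map (dlsMeasure d)).sum := by
  rw [List.map_cons, List.sum_cons, List.map_append, List.sum_append,
    List.map_reverse, List.sum_reverse]
  refine Nat.add_lt_add_right ?_ _
  have hplt : p.length < d.toNat := Int.lt_toNat.mpr (lt_of_not_ge hd)
  have h1 := dlsChildren_measure_sum d s p l ALL_MOVES
  have hms : (ALL_MOVES : List String).length = 12 := rfl
  rw [hms] at h1
  have h2 : 12 * 13 ^ (d.toNat - (p.length + 1)) < 13 * 13 ^ (d.toNat - (p.length + 1)) :=
    Nat.mul_lt_mul_of_lt_of_le (by decide) (le_refl _) (pow_pos (by decide) _)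
  have h3 : dlsMeasure d (s, p, l) = 13 * 13 ^ (d.toNat - (p.length + 1)) := by
    show 13 ^ (d.toNat - p.length) = _
    rw [pvSubSplit _ _ hplt, pow_succ, Nat.mul_comm]
  rw [h3]
  exact Nat.lt_of_le_of_lt h1 h2

-- the while-stack loop of _dls; the top of Python's stack (its last element) is the HEAD of this list,
-- so the block of `stack.append`s becomes prepending the reversed children
def dlsLoop (d : Int) (stack : List (String × List String × String)) (n : Int) :
    Option (List String) × Int :=
  match stack with
  | [] => (none, n)
  | (s, p, l) :: rest =>
    let n := n + 1
    if s = SOLVED then (some p, n)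
    else if (p.length : Int) ≥ d then dlsLoop d rest n
    else dlsLoop d ((dlsChildren s p l ALL_MOVES).reverse ++ rest) n
termination_by (stack.map (dlsMeasure d)).sum
decreasing_by
  · exact pvDlsDec1 d s p l rest
  · rename_i _ hd
    exact pvDlsDec2 d s p l rest hd

-- def _dls(initial, max_depth)
def dls (initial : String) (d : Int) : Option (List String) × Int :=
  dlsLoop d [(initial, [], "")] 0

-- for depth in range(1, max_depth+1): accumulate nodes, return on first solution
def idsLoopA (initial : String) (depths : List Int) (total : Int) : Option (List String) × Int :=
  match depths with
  | [] => (none, total)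
  | d :: ds =>
    let r := dls initial d
    let total := total + r.2
    match r.1 with
    | some res => (some res, total)
    | none => idsLoopA initial ds total

def ids_solve (initial : String) (max_depth : Int) : Option (List String) × Int :=
  if initial = SOLVED then (some [], 0)
  else idsLoopA initial (PySem.List.pyRange 1 (max_depth + 1) 1) 0

-- ===== PORT B =====

theorem pvAllMovesRevLt : (ALL_MOVES.reverse).length < 13 := by decide

theorem pvDfsDec (d : Int) (p : List String) (m : String) (h : (p.length : Int) < d) :
    d.toNat - (p ++ [m]).length < d.toNat - p.length := by
  rw [pvLenAppend p m]
  exact Nat.sub_succ_lt_self _ _ (Int.lt_toNat.mpr h)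

theorem pvConsLt (m : String) (rest : List String) : rest.length < (m :: rest).length :=
  Nat.lt_succ_self rest.length

mutual
-- def _dfs(state, path, last_move, max_depth): nodes = 1; base cases; else loop over reversed(ALL_MOVES)
def dfsB (d : Int) (s : String) (p : List String) (l : String) : Option (List String) × Int :=
  if s = SOLVED then (some p, 1)
  else if h : (p.length : Int) ≥ d then (none, 1)
  else
    let r := dfsGo d s p l (lt_of_not_ge h) ALL_MOVES.reverse 0
    (r.1, 1 + r.2)
termination_by (d.toNat - p.length, 13)
decreasing_by exact Prod.Lex.right _ pvAllMovesRevLt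

-- the `for move in reversed(ALL_MOVES)` loop; acc is the running `nodes - 1`
def dfsGo (d : Int) (s : String) (p : List String) (l : String)
    (h : (p.length : Int) < d) (ms : List String) (acc : Int) :
    Option (List String) × Int :=
  match ms with
  | [] => (none, acc)
  | m :: rest =>
    if pvSkip l m then dfsGo d s p l h rest acc
    else
      let r := dfsB d (apply_move s m) (p ++ [m]) m
      let acc := acc + r.2
      match r.1 with
      | some res => (some res, acc)
      | none => dfsGo d s p l h rest acc
termination_by (d.toNat - p.length, ms.length)
decreasing_by
  · exact Prod.Lex.right _ (pvConsLt m rest)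
  · exact Prod.Lex.left _ _ (pvDfsDec d p m h)
  · exact Prod.Lex.right _ (pvConsLt m rest)
end

def idsLoopB (initial : String) (depths : List Int) (total : Int) : Option (List String) × Int :=
  match depths with
  | [] => (none, total)
  | d :: ds =>
    let r := dfsB d initial [] ""
    let total := total + r.2
    match r.1 with
    | some res => (some res, total)
    | none => idsLoopB initial ds total

def ids_solve_alt (initial : String) (max_depth : Int) : Option (List String) × Int :=
  if initial = SOLVED then (some [], 0)
  else idsLoopB initial (PySem.List.pyRange 1 (max_depth + 1) 1) 0

-- ===== PRECONDITION & SPEC =====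
-- A raises IndexError in apply_move (state[i], i < 24) as soon as one move is applied to a string
-- shorter than 24; a move is applied iff initial ≠ SOLVED and max_depth ≥ 1. Pre_ excludes exactly those inputs.
def Pre_ids_solve (initial : String) (max_depth : Int) : Prop :=
  initial = SOLVED ∨ max_depth < 1 ∨ 24 ≤ initial.toList.length

instance (initial : String) (max_depth : Int) : Decidable (Pre_ids_solve initial max_depth) := by
  unfold Pre_ids_solve; infer_instance

def pvWitness_ids_solve : String × Int := ("GGWWRRRRWGWGYYYYOOOOBBBB", 2)

def Spec_ids_solve (initial : String) (max_depth : Int) (out : Option (List String) × Int) : Prop :=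
  out = ids_solve_alt initial max_depth
instance (initial : String) (max_depth : Int) (out : Option (List String) × Int) :
    Decidable (Spec_ids_solve initial max_depth out) := by unfold Spec_ids_solve; infer_instance

-- ===== CLAIM (what is proved, stated in full; the proofs are below) =====
def Claim_equal_ids_solve : Prop := ∀ (initial : String) (max_depth : Int), Dom_ids_solve initial max_depth → Pre_ids_solve initial max_depth → Spec_ids_solve initial max_depth (ids_solve initial max_depth)

-- ===== LEMMAS AND PROOFS =====

-- proof-side: sequential exploration of a list of frames by B's dfs, with its total node count
def seqB (d : Int) (stack : List (String × List String × String)) : Option (List String) × Int :=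
  match stack with
  | [] => (none, 0)
  | (s, p, l) :: rest =>
    let r := dfsB d s p l
    match r.1 with
    | some res => (some res, r.2)
    | none => ((seqB d rest).1, r.2 + (seqB d rest).2)

theorem seqB_append (d : Int) (xs ys : List (String × List String × String)) :
    seqB d (xs ++ ys) =
      match (seqB d xs).1 with
      | some res => (some res, (seqB d xs).2)
      | none => ((seqB d ys).1, (seqB d xs).2 + (seqB d ys).2) := by
  induction xs with
  | nil => simp [seqB]
  | cons f rest ih =>
    obtain ⟨s, p, l⟩ := f
    simp only [List.cons_append, seqB]
    cases hr : (dfsB d s p l).1 with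
    | some res => simp
    | none =>
      simp only [ih]
      cases (seqB d rest).1 with
      | some res => simp
      | none => simp; ring

theorem dfsGo_eq (d : Int) (s : String) (p : List String) (l : String)
    (h : (p.length : Int) < d) (ms : List String) (acc : Int) :
    dfsGo d s p l h ms acc =
      ((seqB d (dlsChildren s p l ms)).1, acc + (seqB d (dlsChildren s p l ms)).2) := by
  induction ms generalizing acc with
  | nil => simp [dfsGo, dlsChildren, seqB]
  | cons m rest ih =>
    by_cases hs : pvSkip l m
    · rw [dfsGo]
      simp only [hs, if_pos]
      rw [ih]
      simp [dlsChildren, hs]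
    · rw [dfsGo]
      simp only [hs, Bool.false_eq_true, if_neg, not_false_eq_true]
      have hch : dlsChildren s p l (m :: rest)
          = (apply_move s m, p ++ [m], m) :: dlsChildren s p l rest := by
        simp [dlsChildren, hs]
      rw [hch]
      cases hr : (dfsB d (apply_move s m) (p ++ [m]) m).1 with
      | some res => simp [seqB, hr]
      | none =>
        rw [ih]
        simp [seqB, hr]; ring

theorem dlsChildren_reverse (s : String) (p : List String) (l : String) (ms : List String) :
    dlsChildren s p l ms.reverse = (dlsChildren s p l ms).reverse := by
  simp [dlsChildren, List.filterMap_reverse]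

theorem dlsLoop_eq (d : Int) (stack : List (String × List String × String)) (n : Int) :
    dlsLoop d stack n = ((seqB d stack).1, n + (seqB d stack).2) := by
  induction stack, n using dlsLoop.induct d with
  | case1 n => simp [dlsLoop, seqB]
  | case2 n p l rest =>
    rw [dlsLoop, seqB, dfsB]
    simp
  | case3 n s p l rest n2 hs hd ih =>
    rw [dlsLoop]
    simp only [hs, hd, if_neg, if_pos, not_false_eq_true]
    rw [ih, seqB]
    have hb : dfsB d s p l = (none, 1) := by rw [dfsB]; simp [hs, hd]
    rw [hb]
    simp only [Prod.mk.injEq, true_and]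
    ring
  | case4 n s p l rest n2 hs hd ih =>
    rw [dlsLoop]
    simp only [hs, hd, if_neg, not_false_eq_true]
    rw [ih]
    have hlt : (p.length : Int) < d := by omega
    have hb : dfsB d s p l
        = ((seqB d ((dlsChildren s p l ALL_MOVES).reverse)).1,
           1 + (seqB d ((dlsChildren s p l ALL_MOVES).reverse)).2) := by
      rw [dfsB]
      simp only [hs, if_neg, not_false_eq_true]
      rw [dif_neg (by omega)]
      rw [dfsGo_eq, dlsChildren_reverse]
      simp
    rw [seqB_append, seqB, hb]
    have hn2 : n2 = n + 1 := rfl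
    cases hr : (seqB d ((dlsChildren s p l ALL_MOVES).reverse)).1 with
    | some res => simp; omega
    | none =>
      cases (seqB d rest).1 <;> · simp; ring

theorem dls_eq_dfsB (initial : String) (d : Int) :
    dls initial d = dfsB d initial [] "" := by
  rw [dls, dlsLoop_eq, seqB]
  cases hr : (dfsB d initial [] "").1 with
  | some res =>
    have : dfsB d initial [] "" = (some res, (dfsB d initial [] "").2) := by
      cases h : dfsB d initial [] ""; simp_all
    rw [this]; simp
  | none =>
    have : dfsB d initial [] "" = (none, (dfsB d initial [] "").2) := by
      cases h : dfsB d initial [] ""; simp_all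
    rw [this]; simp [seqB]

theorem idsLoop_eq (initial : String) (depths : List Int) (total : Int) :
    idsLoopA initial depths total = idsLoopB initial depths total := by
  induction depths generalizing total with
  | nil => rfl
  | cons d ds ih =>
    rw [idsLoopA, idsLoopB, dls_eq_dfsB]
    cases (dfsB d initial [] "").1 with
    | some res => simp
    | none => simp [ih]

-- ===== VERDICT (by name: the statement is the Claim_ definition above) =====
theorem ids_solve_spec : Claim_equal_ids_solve := by
  intro initial max_depth _ _
  unfold Spec_ids_solve ids_solve ids_solve_alt
  by_cases h : initial = SOLVED
  · simp [h]
  · simp only [h, if_neg, not_false_eq_true]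
    exact idsLoop_eq initial _ 0
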